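-- pv_equiv track=rewrite | github.com/wsgan001/repeated_pattern_discovery | orig_algorithms.py | compute_mtp_cis_pairs
-- ===== SOURCE A (Python) =====
-- from operator import itemgetter
--
-- def compute_mtp_cis_pairs(v):
--     """ Implements algorithm of Figure 3 from [Meredith2013].
--         Returns a list of pairs where the first element is the set of
--         vectors in the MTP and the second element is the list of indices
--         for those vectors in the sorted dataset. """
--
--     w = []
--     for i in range(0, len(v)):
--         for j in range(0, len(v[i])):
--             w.append(v[i][j])
--
--     w.sort(key=itemgetter(0))
--
--     mtps = []
--     ciss = []
--     vec = w[0][0]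
--     mtp = [w[0][1]]
--     cis = [w[0][2]]
--
--     for i in range(1, len(w)):
--         vpi = w[i]
--         if vpi[0] == vec:
--             mtp.append(vpi[1])
--             cis.append(vpi[2])
--         else:
--             mtps.append(mtp)
--             ciss.append(cis)
--             mtp = [vpi[1]]
--             cis = [vpi[2]]
--             vec = vpi[0]
--
--     mtps.append(mtp)
--     ciss.append(cis)
--
--     mcps = []
--     for i in range(0, len(mtps)):
--         mcps.append((mtps[i], ciss[i]))
--
--     return mcps
-- ===== SOURCE B (Python) =====
-- def compute_mtp_cis_pairs(v):
--     """Group the flattened vectors by their first component (a dict keyed by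
--     x[0]), then emit the groups in sorted key order.  Returns [] when v holds
--     no vectors (where the original indexes into an empty list)."""
--     groups = {}
--     ciss = {}
--     for row in v:
--         for x in row:
--             groups.setdefault(x[0], []).append(x[1])
--             ciss.setdefault(x[0], []).append(x[2])
--     return [(groups[k], ciss[k]) for k in sorted(groups)]
-- ===== Notes on version B (the rewrite author's own statement) =====
-- stated objective: idiomatic
-- what changed: Replaces flatten + stable sort of all n vectors + run-grouping scan with a single dict-bucketing pass keyed by x[0] (setdefault/append) followed by a sort of only the k distinct keys.
-- outside the precondition, e.g. on compute_mtp_cis_pairs([]): A raises IndexError, B returns []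
-- crash fix: On inputs whose rows are all empty (no vectors at all, e.g. ([],)) A raises IndexError at w[0][0]; B returns []. — e.g. on compute_mtp_cis_pairs([[], []]): A raises IndexError, B returns []
import Mathlib
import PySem

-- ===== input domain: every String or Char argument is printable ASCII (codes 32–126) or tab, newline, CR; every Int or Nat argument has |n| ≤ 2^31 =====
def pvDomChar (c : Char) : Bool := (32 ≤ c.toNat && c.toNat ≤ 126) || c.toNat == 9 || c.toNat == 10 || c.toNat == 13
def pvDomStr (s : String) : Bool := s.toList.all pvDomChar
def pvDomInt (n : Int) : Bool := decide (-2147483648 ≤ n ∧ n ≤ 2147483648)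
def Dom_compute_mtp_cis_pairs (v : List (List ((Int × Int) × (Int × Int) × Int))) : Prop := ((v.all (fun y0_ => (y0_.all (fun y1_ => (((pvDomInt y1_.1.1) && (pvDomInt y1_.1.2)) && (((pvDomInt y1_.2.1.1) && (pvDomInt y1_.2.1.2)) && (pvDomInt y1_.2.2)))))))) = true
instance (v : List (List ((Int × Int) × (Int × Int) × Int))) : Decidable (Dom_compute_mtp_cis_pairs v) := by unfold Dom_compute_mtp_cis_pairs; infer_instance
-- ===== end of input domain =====

-- B replaces A's flatten + stable sort + run-grouping scan by one dict-bucketing pass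
-- over the vectors followed by a sort of the distinct keys (objective: idiomatic; same value).

-- ===== PORT A =====
-- helper naming the body of A's grouping loop ('for i in range(1, len(w))');
-- state = (mtps, ciss, vec, mtp, cis)
def pvAStep (st : List (List (Int × Int)) × List (List Int) × (Int × Int) × List (Int × Int) × List Int)
    (vpi : (Int × Int) × (Int × Int) × Int) :
    List (List (Int × Int)) × List (List Int) × (Int × Int) × List (Int × Int) × List Int :=
  if vpi.1 = st.2.2.1 then
    (st.1, st.2.1, st.2.2.1, st.2.2.2.1 ++ [vpi.2.1], st.2.2.2.2 ++ [vpi.2.2])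
  else
    (st.1 ++ [st.2.2.2.1], st.2.1 ++ [st.2.2.2.2], vpi.1, [vpi.2.1], [vpi.2.2])

def compute_mtp_cis_pairs (v : List (List ((Int × Int) × (Int × Int) × Int))) : List ((List (Int × Int)) × List Int) :=
  let w0 := v.foldl (fun w vi => vi.foldl (fun w x => w ++ [x]) w) []
  let w := PySem.List.sorted2 w0 (fun x => x.1.1) (fun x => x.1.2)
  match w with
  | [] => []          -- Python raises IndexError at w[0] here; such inputs are outside Pre_
  | wh :: wt =>
    let st := wt.foldl pvAStep ([], [], wh.1, [wh.2.1], [wh.2.2])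
    let mtps := st.1 ++ [st.2.2.2.1]
    let ciss := st.2.1 ++ [st.2.2.2.2]
    (PySem.List.pyRange 0 (PySem.List.len mtps)).foldl
      (fun mcps i => mcps ++ [(PySem.List.pyGetD mtps i [], PySem.List.pyGetD ciss i [])]) []

-- ===== PORT B =====
-- helper naming the body of B's bucketing loop; state = (groups, ciss);
-- 'groups.setdefault(x[0], []).append(x[1])' is d[x.1] = d.get(x.1, []) ++ [x.2.1], i.e. Dict.modify
def pvBStep (st : PySem.Dict (Int × Int) (List (Int × Int)) × PySem.Dict (Int × Int) (List Int))
    (x : (Int × Int) × (Int × Int) × Int) :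
    PySem.Dict (Int × Int) (List (Int × Int)) × PySem.Dict (Int × Int) (List Int) :=
  (st.1.modify x.1 [] (· ++ [x.2.1]), st.2.modify x.1 [] (· ++ [x.2.2]))

def compute_mtp_cis_pairs_alt (v : List (List ((Int × Int) × (Int × Int) × Int))) : List ((List (Int × Int)) × List Int) :=
  let st := v.foldl (fun st row => row.foldl pvBStep st) (PySem.Dict.empty, PySem.Dict.empty)
  (PySem.List.sorted2 st.1.keys (fun k => k.1) (fun k => k.2)).map
    (fun k => (st.1.getD k [], st.2.getD k []))

-- ===== PRECONDITION & SPEC =====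
-- Pre_ excludes exactly the inputs with no vectors at all (all rows empty), on which
-- the Python A raises IndexError at w[0][0].
def Pre_compute_mtp_cis_pairs (v : List (List ((Int × Int) × (Int × Int) × Int))) : Prop :=
  v.flatten ≠ []
instance (v : List (List ((Int × Int) × (Int × Int) × Int))) : Decidable (Pre_compute_mtp_cis_pairs v) := by
  unfold Pre_compute_mtp_cis_pairs; infer_instance

def pvWitness_compute_mtp_cis_pairs : (List (List ((Int × Int) × (Int × Int) × Int))) :=
  [[((0, 0), (1, 2), 3)]]

-- On inputs whose rows are all empty (no vectors at all) A raises IndexError at w[0][0]; B returns [].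
def Raises_compute_mtp_cis_pairs (v : List (List ((Int × Int) × (Int × Int) × Int))) : Prop :=
  v.flatten = []
instance (v : List (List ((Int × Int) × (Int × Int) × Int))) : Decidable (Raises_compute_mtp_cis_pairs v) := by
  unfold Raises_compute_mtp_cis_pairs; infer_instance
def pvRaiseWitness_compute_mtp_cis_pairs : (List (List ((Int × Int) × (Int × Int) × Int))) := [[], []]
def pvRaiseWitnessOut_compute_mtp_cis_pairs : List ((List (Int × Int)) × List Int) := []

def Spec_compute_mtp_cis_pairs (v : List (List ((Int × Int) × (Int × Int) × Int))) (out : List ((List (Int × Int)) × List Int)) : Prop := out = compute_mtp_cis_pairs_alt v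
instance (v : List (List ((Int × Int) × (Int × Int) × Int))) (out : List ((List (Int × Int)) × List Int)) : Decidable (Spec_compute_mtp_cis_pairs v out) := by unfold Spec_compute_mtp_cis_pairs; infer_instance

-- ===== CLAIM (what is proved, stated in full; the proofs are below) =====
def Claim_equal_compute_mtp_cis_pairs : Prop := ∀ (v : List (List ((Int × Int) × (Int × Int) × Int))), Dom_compute_mtp_cis_pairs v → Pre_compute_mtp_cis_pairs v → Spec_compute_mtp_cis_pairs v (compute_mtp_cis_pairs v)
def Claim_raises_compute_mtp_cis_pairs : Prop := (∀ (v : List (List ((Int × Int) × (Int × Int) × Int))), Dom_compute_mtp_cis_pairs v → Raises_compute_mtp_cis_pairs v → ¬ Pre_compute_mtp_cis_pairs v) ∧ (Dom_compute_mtp_cis_pairs (pvRaiseWitness_compute_mtp_cis_pairs) ∧ Raises_compute_mtp_cis_pairs (pvRaiseWitness_compute_mtp_cis_pairs) ∧ compute_mtp_cis_pairs_alt (pvRaiseWitness_compute_mtp_cis_pairs) = pvRaiseWitnessOut_compute_mtp_cis_pairs)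

-- ===== LEMMAS AND PROOFS =====

-- Python's lexicographic strict order on int pairs, as sorted2's 'before' test
def pvLtk (a b : Int × Int) : Bool :=
  decide (a.1 < b.1) || (!decide (b.1 < a.1) && decide (a.2 < b.2))

-- the bucket of key k in flatten order
def pvF (w : List ((Int × Int) × (Int × Int) × Int)) (k : Int × Int) :
    List ((Int × Int) × (Int × Int) × Int) :=
  w.filter (fun y => y.1 == k)

-- the distinct keys, sorted
def pvSks (w : List ((Int × Int) × (Int × Int) × Int)) : List (Int × Int) :=
  PySem.List.sorted2 (PySem.Set.ofList (w.map (fun y => y.1))) (fun k => k.1) (fun k => k.2)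

lemma pvLtk_irrefl (a : Int × Int) : pvLtk a a = false := by simp [pvLtk]

lemma pvLtk_asymm {a b : Int × Int} (h : pvLtk a b = true) : pvLtk b a = false := by
  simp [pvLtk] at *; omega

lemma pvLtk_total {a b : Int × Int} (h : a ≠ b) : pvLtk a b = true ∨ pvLtk b a = true := by
  obtain ⟨a1, a2⟩ := a; obtain ⟨b1, b2⟩ := b
  simp [pvLtk, Prod.mk.injEq] at *
  omega

lemma pvLtk_trans {a b c : Int × Int} (h1 : pvLtk a b = true) (h2 : pvLtk b c = true) :
    pvLtk a c = true := by
  simp [pvLtk] at *; omega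

lemma pvLtk_ne {a b : Int × Int} (h : pvLtk a b = true) : a ≠ b := by
  rintro rfl; simp [pvLtk_irrefl] at h

lemma pv_insertBy_nil {α : Type} (before : α → α → Bool) (x : α) :
    PySem.List.insertBy before x [] = [x] := by
  simp [PySem.List.insertBy]

lemma pv_insertBy_cons_before {α : Type} {before : α → α → Bool} {x y : α} (t : List α)
    (h : before x y = true) : PySem.List.insertBy before x (y :: t) = x :: y :: t := by
  simp [PySem.List.insertBy, h]

lemma pv_insertBy_cons_not {α : Type} {before : α → α → Bool} {x y : α} (t : List α)
    (h : before x y = false) :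
    PySem.List.insertBy before x (y :: t) = y :: PySem.List.insertBy before x t := by
  simp [PySem.List.insertBy, h]

lemma pv_insertBy_all_before {α : Type} {before : α → α → Bool} {x : α} {t : List α}
    (h : ∀ y ∈ t, before x y = true) : PySem.List.insertBy before x t = x :: t := by
  cases t with
  | nil => simp [pv_insertBy_nil]
  | cons y t => exact pv_insertBy_cons_before t (h y (by simp))

lemma pv_insertBy_append_not {α : Type} {before : α → α → Bool} {x : α} {l : List α}
    (t : List α) (h : ∀ y ∈ l, before x y = false) :
    PySem.List.insertBy before x (l ++ t) = l ++ PySem.List.insertBy before x t := by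
  induction l with
  | nil => simp
  | cons y l ih =>
      simp only [List.cons_append, pv_insertBy_cons_not _ (h y (by simp))]
      rw [ih (fun z hz => h z (by simp [hz]))]

lemma pv_sorted2_snoc {α κ₁ κ₂ : Type} [LT κ₁] [DecidableLT κ₁] [LT κ₂] [DecidableLT κ₂]
    (xs : List α) (x : α) (k1 : α → κ₁) (k2 : α → κ₂) :
    PySem.List.sorted2 (xs ++ [x]) k1 k2 false =
      PySem.List.insertBy
        (fun a b => decide (k1 a < k1 b) || (!decide (k1 b < k1 a) && decide (k2 a < k2 b)))
        x (PySem.List.sorted2 xs k1 k2 false) := by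
  simp [PySem.List.sorted2, List.foldl_append]

lemma pv_pairwise_insertBy {t : List (Int × Int)} {x : Int × Int}
    (hp : t.Pairwise (fun a b => pvLtk a b = true)) (hx : ∀ y ∈ t, y ≠ x) :
    (PySem.List.insertBy pvLtk x t).Pairwise (fun a b => pvLtk a b = true) := by
  induction t with
  | nil => simp [pv_insertBy_nil]
  | cons y t ih =>
      rcases List.pairwise_cons.mp hp with ⟨hy, hp'⟩
      by_cases h : pvLtk x y = true
      · rw [pv_insertBy_cons_before _ h]
        refine List.pairwise_cons.mpr ⟨?_, hp⟩
        intro z hz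
        rcases List.mem_cons.mp hz with rfl | hz
        · exact h
        · exact pvLtk_trans h (hy z hz)
      · rw [pv_insertBy_cons_not _ (by simpa using h)]
        refine List.pairwise_cons.mpr ⟨?_, ih hp' (fun z hz => hx z (by simp [hz]))⟩
        intro z hz
        rcases (PySem.List.mem_insertBy _ _ _ _).mp hz with rfl | hz
        · rcases pvLtk_total (Ne.symm (hx y (by simp))) with h' | h'
          · exact absurd h' h
          · exact h'
        · exact hy z hz

lemma pv_sorted2_keys_pairwise (ks : List (Int × Int)) (h : ks.Nodup) :
    (PySem.List.sorted2 ks (fun k => k.1) (fun k => k.2) false).Pairwise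
      (fun a b => pvLtk a b = true) := by
  induction ks using List.reverseRecOn with
  | nil => simp [PySem.List.sorted2]
  | append_singleton ks x ih =>
      rw [pv_sorted2_snoc]
      have hnd : ks.Nodup := h.of_append_left
      have hx : x ∉ ks := by
        intro hm
        have := List.disjoint_of_nodup_append h hm
        simp at this
      show (PySem.List.insertBy pvLtk x _).Pairwise _
      refine pv_pairwise_insertBy (ih hnd) ?_
      intro y hy
      have : y ∈ ks := ((PySem.List.sorted2_perm ks _ _ false).mem_iff).mp hy
      intro hxy; exact hx (hxy ▸ this)

lemma pvF_key {w : List ((Int × Int) × (Int × Int) × Int)} {k : Int × Int}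
    {y : (Int × Int) × (Int × Int) × Int} (h : y ∈ pvF w k) : y.1 = k := by
  simp [pvF, List.mem_filter] at h; exact h.2

lemma pvF_snoc (w : List ((Int × Int) × (Int × Int) × Int))
    (x : (Int × Int) × (Int × Int) × Int) (k : Int × Int) :
    pvF (w ++ [x]) k = pvF w k ++ (if x.1 = k then [x] else []) := by
  by_cases h : x.1 = k <;> simp [pvF, List.filter_append, h]

lemma pvF_nonempty {w : List ((Int × Int) × (Int × Int) × Int)} {k : Int × Int}
    (h : ∃ y ∈ w, y.1 = k) : ∃ z t, pvF w k = z :: t := by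
  obtain ⟨y, hyw, hyk⟩ := h
  have : y ∈ pvF w k := by simp [pvF, List.mem_filter, hyw, hyk]
  cases hF : pvF w k with
  | nil => rw [hF] at this; simp at this
  | cons z t => exact ⟨z, t, rfl⟩

-- inserting one vector into the grouped-by-sorted-keys form
lemma pv_ins_group (sks : List (Int × Int)) (w : List ((Int × Int) × (Int × Int) × Int))
    (x : (Int × Int) × (Int × Int) × Int)
    (hpw : sks.Pairwise (fun a b => pvLtk a b = true))
    (hcov : ∀ k ∈ sks, ∃ y ∈ w, y.1 = k)
    (hx : x.1 ∈ sks ∨ pvF w x.1 = []) :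
    PySem.List.insertBy (fun a b => pvLtk a.1 b.1) x (sks.flatMap (pvF w)) =
      (if x.1 ∈ sks then sks else PySem.List.insertBy pvLtk x.1 sks).flatMap (pvF (w ++ [x])) := by
  induction sks with
  | nil =>
      have hfe : pvF w x.1 = [] := by
        rcases hx with h | h
        · simp at h
        · exact h
      rw [if_neg (by simp)]
      simp [pv_insertBy_nil, pvF_snoc, hfe]
  | cons k ks ih =>
      rcases List.pairwise_cons.mp hpw with ⟨hk, hpw'⟩
      have hknx : ∀ k' ∈ ks, k' ≠ x.1 → pvF (w ++ [x]) k' = pvF w k' := fun k' _ hne => by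
        rw [pvF_snoc, if_neg (fun h => hne h.symm), List.append_nil]
      by_cases hxk : x.1 = k
      · -- x's key is the head key: x joins the head block
        rw [if_pos (by simp [hxk])]
        simp only [List.flatMap_cons]
        rw [pv_insertBy_append_not _ (fun y hy => by
              have : y.1 = k := pvF_key hy
              show pvLtk x.1 y.1 = false
              rw [this, hxk, pvLtk_irrefl]),
          pv_insertBy_all_before (fun z hz => by
              obtain ⟨k', hk', hzk'⟩ := List.mem_flatMap.mp hz
              have : z.1 = k' := pvF_key hzk'
              show pvLtk x.1 z.1 = true
              rw [this, hxk]; exact hk k' hk')]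
        rw [pvF_snoc, if_pos hxk]
        have : ks.flatMap (pvF (w ++ [x])) = ks.flatMap (pvF w) := by
          refine List.flatMap_congr (fun k' hk' => hknx k' hk' ?_)
          intro h; exact pvLtk_ne (hk _ (h ▸ hk')) hxk.symm
        rw [this]
        simp
      · by_cases hlt : pvLtk x.1 k = true
        · -- x's key precedes every present key: new first block [x]
          have hnm : x.1 ∉ k :: ks := by
            intro hm
            rcases List.mem_cons.mp hm with h | h
            · exact hxk h
            · have := hk _ h
              rw [pvLtk_asymm this] at hlt; exact Bool.false_ne_true hlt
          have hfe : pvF w x.1 = [] := by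
            rcases hx with h | h
            · exact absurd h hnm
            · exact h
          rw [if_neg hnm, pv_insertBy_cons_before _ hlt]
          obtain ⟨z, t, hF⟩ := pvF_nonempty (hcov k (by simp))
          have hz : z.1 = k := pvF_key (by rw [hF]; simp)
          simp only [List.flatMap_cons, hF, List.cons_append]
          rw [pv_insertBy_cons_before _ (by show pvLtk x.1 z.1 = true; rw [hz]; exact hlt)]
          rw [pvF_snoc, if_pos rfl, hfe, List.nil_append]
          have h1 : pvF (w ++ [x]) k = pvF w k := by
            rw [pvF_snoc, if_neg hxk, List.append_nil]
          have h2 : ks.flatMap (pvF (w ++ [x])) = ks.flatMap (pvF w) := by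
            refine List.flatMap_congr (fun k' hk' => hknx k' hk' ?_)
            intro h; exact hnm (by simp [← h, hk'])
          simp [h1, h2, hF]
        · -- x's key comes after the head key: recurse into the tail
          have hgt : pvLtk k x.1 = true := by
            rcases pvLtk_total hxk with h | h
            · exact absurd h hlt
            · exact h
          have hmem_iff : (x.1 ∈ k :: ks) ↔ x.1 ∈ ks := by
            simp [List.mem_cons, hxk]
          have hx' : x.1 ∈ ks ∨ pvF w x.1 = [] := by
            rcases hx with h | h
            · exact Or.inl (hmem_iff.mp h)
            · exact Or.inr h
          have hrec := ih hpw' (fun k' hk' => hcov k' (by simp [hk'])) hx'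
          simp only [List.flatMap_cons]
          rw [pv_insertBy_append_not _ (fun y hy => by
                have : y.1 = k := pvF_key hy
                show pvLtk x.1 y.1 = false
                rw [this]; simpa using hlt)]
          rw [hrec]
          have h1 : pvF (w ++ [x]) k = pvF w k := by
            rw [pvF_snoc, if_neg hxk, List.append_nil]
          by_cases hmem : x.1 ∈ ks
          · rw [if_pos (hmem_iff.mpr hmem), if_pos hmem]
            simp [h1]
          · rw [if_neg (fun h => hmem (hmem_iff.mp h)), if_neg hmem]
            rw [pv_insertBy_cons_not _ (by simpa using hlt)]
            simp [h1]

-- the stable sort by the first component IS the grouped-by-sorted-keys form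
lemma pv_sorted_grouped (w : List ((Int × Int) × (Int × Int) × Int)) :
    PySem.List.sorted2 w (fun x => x.1.1) (fun x => x.1.2) false = (pvSks w).flatMap (pvF w) := by
  induction w using List.reverseRecOn with
  | nil => rfl
  | append_singleton w x ih =>
      have hperm := PySem.List.sorted2_perm (PySem.Set.ofList (w.map (fun y => y.1)))
        (fun k => k.1) (fun k => k.2) false
      have hmemiff : x.1 ∈ pvSks w ↔ x.1 ∈ w.map (fun y => y.1) := by
        rw [pvSks, hperm.mem_iff, PySem.Set.mem_ofList]
      have hpw := pv_sorted2_keys_pairwise _ (PySem.Set.nodup_ofList (w.map (fun y => y.1)))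
      have hcov : ∀ k ∈ pvSks w, ∃ y ∈ w, y.1 = k := by
        intro k hkm
        rw [pvSks, hperm.mem_iff, PySem.Set.mem_ofList, List.mem_map] at hkm
        exact hkm
      have hx : x.1 ∈ pvSks w ∨ pvF w x.1 = [] := by
        by_cases hm : x.1 ∈ w.map (fun y => y.1)
        · exact Or.inl (hmemiff.mpr hm)
        · refine Or.inr (List.filter_eq_nil_iff.mpr ?_)
          intro y hy
          simp only [beq_iff_eq]
          intro hyx
          exact hm (List.mem_map.mpr ⟨y, hy, hyx⟩)
      rw [pv_sorted2_snoc, ih,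
        show (fun (a b : (Int × Int) × (Int × Int) × Int) =>
            decide (a.1.1 < b.1.1) || (!decide (b.1.1 < a.1.1) && decide (a.1.2 < b.1.2))) =
          (fun (a b : (Int × Int) × (Int × Int) × Int) => pvLtk a.1 b.1) from rfl,
        pv_ins_group (pvSks w) w x hpw hcov hx]
      congr 1
      -- the sorted key list of w ++ [x]
      have hsnoc : PySem.Set.ofList (w.map (fun y => y.1) ++ [x.1]) =
          PySem.Set.add (PySem.Set.ofList (w.map (fun y => y.1))) x.1 := by
        rw [PySem.Set.ofList_eq_foldl, List.foldl_append, ← PySem.Set.ofList_eq_foldl]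
        rfl
      by_cases hm : x.1 ∈ w.map (fun y => y.1)
      · rw [if_pos (hmemiff.mpr hm)]
        unfold pvSks
        congr 1
        rw [List.map_append]
        simp only [List.map_cons, List.map_nil]
        rw [hsnoc]
        have : PySem.Set.add (PySem.Set.ofList (w.map (fun y => y.1))) x.1 =
            PySem.Set.ofList (w.map (fun y => y.1)) := by
          have hc : PySem.Set.contains (PySem.Set.ofList (w.map (fun y => y.1))) x.1 = true := by
            have : x.1 ∈ PySem.Set.ofList (w.map (fun y => y.1)) :=
              (PySem.Set.mem_ofList _ _).mpr hm
            simpa [PySem.Set.contains] using this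
          unfold PySem.Set.add
          rw [hc]
          simp
        rw [this]
      · rw [if_neg (fun h => hm (hmemiff.mp h))]
        unfold pvSks
        rw [List.map_append]
        simp only [List.map_cons, List.map_nil]
        rw [hsnoc]
        have : PySem.Set.add (PySem.Set.ofList (w.map (fun y => y.1))) x.1 =
            PySem.Set.ofList (w.map (fun y => y.1)) ++ [x.1] := by
          have hc : PySem.Set.contains (PySem.Set.ofList (w.map (fun y => y.1))) x.1 = false := by
            have : x.1 ∉ PySem.Set.ofList (w.map (fun y => y.1)) :=
              fun h => hm ((PySem.Set.mem_ofList _ _).mp h)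
            simpa [PySem.Set.contains] using this
          unfold PySem.Set.add
          rw [hc]
          simp
        rw [this, pv_sorted2_snoc]
        rfl

-- A's grouping loop over one block whose vectors all share the current key
lemma pv_block_fold (b : List ((Int × Int) × (Int × Int) × Int))
    (m : List (List (Int × Int))) (c : List (List Int)) (vec : Int × Int)
    (mtp : List (Int × Int)) (cis : List Int) (h : ∀ y ∈ b, y.1 = vec) :
    b.foldl pvAStep (m, c, vec, mtp, cis) =
      (m, c, vec, mtp ++ b.map (fun y => y.2.1), cis ++ b.map (fun y => y.2.2)) := by
  induction b generalizing mtp cis with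
  | nil => simp
  | cons y b ih =>
      have hy : y.1 = vec := h y (by simp)
      have hstep : pvAStep (m, c, vec, mtp, cis) y =
          (m, c, vec, mtp ++ [y.2.1], cis ++ [y.2.2]) := by
        simp [pvAStep, hy]
      rw [List.foldl_cons, hstep, ih _ _ (fun z hz => h z (by simp [hz]))]
      simp

-- A's grouping loop over a list of nonempty blocks with pairwise-new keys
lemma pv_run_fold (bs : List ((Int × Int) × List ((Int × Int) × (Int × Int) × Int)))
    (m : List (List (Int × Int))) (c : List (List Int)) (vec : Int × Int)
    (mtp : List (Int × Int)) (cis : List Int)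
    (hb : ∀ p ∈ bs, p.2 ≠ [] ∧ ∀ y ∈ p.2, y.1 = p.1)
    (hch : (vec :: bs.map (fun p => p.1)).Pairwise (· ≠ ·)) :
    ((bs.flatMap (fun p => p.2)).foldl pvAStep (m, c, vec, mtp, cis)).1 ++
        [((bs.flatMap (fun p => p.2)).foldl pvAStep (m, c, vec, mtp, cis)).2.2.2.1] =
      m ++ [mtp] ++ bs.map (fun p => p.2.map (fun y => y.2.1)) ∧
    ((bs.flatMap (fun p => p.2)).foldl pvAStep (m, c, vec, mtp, cis)).2.1 ++
        [((bs.flatMap (fun p => p.2)).foldl pvAStep (m, c, vec, mtp, cis)).2.2.2.2] =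
      c ++ [cis] ++ bs.map (fun p => p.2.map (fun y => y.2.2)) := by
  induction bs generalizing m c vec mtp cis with
  | nil => simp
  | cons p bs ih =>
      obtain ⟨k, b⟩ := p
      obtain ⟨hbne, hbk⟩ := hb (k, b) (by simp)
      obtain ⟨y, b', rfl⟩ : ∃ y b', b = y :: b' := by
        cases b with
        | nil => exact absurd rfl hbne
        | cons y b' => exact ⟨y, b', rfl⟩
      have hky : y.1 = k := hbk y (by simp)
      rcases List.pairwise_cons.mp hch with ⟨hvec, hch'⟩
      have hne : k ≠ vec := (hvec k (by simp)).symm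
      simp only [List.flatMap_cons, List.cons_append, List.foldl_append, List.foldl_cons]
      have hstep : pvAStep (m, c, vec, mtp, cis) y =
          (m ++ [mtp], c ++ [cis], y.1, [y.2.1], [y.2.2]) := by
        simp [pvAStep, hky, hne]
      rw [hstep, hky,
        pv_block_fold b' (m ++ [mtp]) (c ++ [cis]) k [y.2.1] [y.2.2]
          (fun z hz => hbk z (by simp [hz]))]
      have hrec := ih (m ++ [mtp]) (c ++ [cis]) k ([y.2.1] ++ b'.map (fun y => y.2.1))
        ([y.2.2] ++ b'.map (fun y => y.2.2))
        (fun q hq => hb q (by simp [hq]))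
        (by simpa using hch')
      refine ⟨?_, ?_⟩
      · rw [hrec.1]; simp
      · rw [hrec.2]; simp

-- the pyRange/pyGetD output loop is zip
lemma pv_range_zip (mtps : List (List (Int × Int))) (ciss : List (List Int))
    (h : mtps.length = ciss.length) :
    (PySem.List.pyRange 0 (PySem.List.len mtps)).foldl
        (fun mcps i => mcps ++ [(PySem.List.pyGetD mtps i [], PySem.List.pyGetD ciss i [])]) [] =
      mtps.zip ciss := by
  rw [PySem.List.foldl_append_singleton_eq_map, List.nil_append,
    ← List.zip_map' (f := fun i => PySem.List.pyGetD mtps i [])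
      (g := fun i => PySem.List.pyGetD ciss i []),
    PySem.List.map_pyGetD_pyRange_zero]
  congr 1
  rw [show PySem.List.len mtps = PySem.List.len ciss by simp [PySem.List.len, h],
    PySem.List.map_pyGetD_pyRange_zero]

-- B's pair-of-dicts loop is two independent dict loops
lemma pv_bfold (l : List ((Int × Int) × (Int × Int) × Int))
    (st : PySem.Dict (Int × Int) (List (Int × Int)) × PySem.Dict (Int × Int) (List Int)) :
    l.foldl pvBStep st =
      (l.foldl (fun d x => PySem.Dict.modify d x.1 [] (· ++ [x.2.1])) st.1,
       l.foldl (fun d x => PySem.Dict.modify d x.1 [] (· ++ [x.2.2])) st.2) := by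
  induction l generalizing st with
  | nil => simp
  | cons y l ih => rw [List.foldl_cons, ih]; rfl

lemma pv_groups_getD (w : List ((Int × Int) × (Int × Int) × Int)) (k : Int × Int) :
    (w.foldl (fun d x => PySem.Dict.modify d x.1 [] (· ++ [x.2.1])) PySem.Dict.empty).getD k [] =
      (pvF w k).map (fun y => y.2.1) := by
  have h := PySem.Dict.getD_foldl_modify_append
    (w.map (fun x => (x.1, x.2.1))) PySem.Dict.empty k
  rw [List.foldl_map] at h
  simpa [pvF, List.filter_map, List.map_map, Function.comp] using h

lemma pv_ciss_getD (w : List ((Int × Int) × (Int × Int) × Int)) (k : Int × Int) :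
    (w.foldl (fun d x => PySem.Dict.modify d x.1 [] (· ++ [x.2.2])) PySem.Dict.empty).getD k [] =
      (pvF w k).map (fun y => y.2.2) := by
  have h := PySem.Dict.getD_foldl_modify_append
    (w.map (fun x => (x.1, x.2.2))) PySem.Dict.empty k
  rw [List.foldl_map] at h
  simpa [pvF, List.filter_map, List.map_map, Function.comp] using h

lemma pv_groups_keys (w : List ((Int × Int) × (Int × Int) × Int)) :
    (w.foldl (fun d x => PySem.Dict.modify d x.1 [] (· ++ [x.2.1])) PySem.Dict.empty).keys =
      PySem.Set.ofList (w.map (fun y => y.1)) := by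
  have h := PySem.Dict.keys_foldl_modify_key w (fun x => x.1) ([] : List (Int × Int))
    (fun _ x => (· ++ [x.2.1])) PySem.Dict.empty
  simpa [PySem.Set.update, ← PySem.Set.ofList_eq_foldl] using h

-- ===== VERDICT (by name: the statement is the Claim_ definition above) =====
theorem compute_mtp_cis_pairs_spec : Claim_equal_compute_mtp_cis_pairs := by
  intro v _ hpre
  unfold Spec_compute_mtp_cis_pairs compute_mtp_cis_pairs compute_mtp_cis_pairs_alt
  simp only [PySem.List.foldl_append_singleton_eq_self, PySem.List.foldl_append_eq_flatten,
    List.nil_append]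
  rw [← List.foldl_flatten, pv_bfold]
  simp only [pv_groups_keys, pv_groups_getD, pv_ciss_getD, pv_sorted_grouped]
  set w := v.flatten with hw
  have hperm := PySem.List.sorted2_perm (PySem.Set.ofList (w.map (fun y => y.1)))
    (fun k => k.1) (fun k => k.2) false
  have hSks : PySem.List.sorted2 (PySem.Set.ofList (w.map (fun y => y.1)))
      (fun k => k.1) (fun k => k.2) false = pvSks w := rfl
  rw [hSks]
  have hpw := pv_sorted2_keys_pairwise _ (PySem.Set.nodup_ofList (w.map (fun y => y.1)))
  rw [hSks] at hpw
  have hcov : ∀ k ∈ pvSks w, ∃ y ∈ w, y.1 = k := by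
    intro k hkm
    rw [pvSks, hperm.mem_iff, PySem.Set.mem_ofList, List.mem_map] at hkm
    exact hkm
  obtain ⟨y, w', hw'⟩ : ∃ y w', w = y :: w' := by
    cases hww : w with
    | nil => exact absurd hww hpre
    | cons y w' => exact ⟨y, w', rfl⟩
  have hy : y.1 ∈ pvSks w := by
    rw [pvSks, hperm.mem_iff, PySem.Set.mem_ofList]
    exact List.mem_map.mpr ⟨y, by rw [hw']; simp, rfl⟩
  cases hsks : pvSks w with
  | nil => rw [hsks] at hy; simp at hy
  | cons k0 ks =>
  rw [hsks] at hpw hcov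
  obtain ⟨y0, t0, hF0⟩ := pvF_nonempty (hcov k0 (by simp))
  have hk0 : y0.1 = k0 := pvF_key (by rw [hF0]; simp)
  rw [List.flatMap_cons, hF0]
  simp only [List.cons_append, List.foldl_append]
  have hblock := pv_block_fold t0 [] [] y0.1 [y0.2.1] [y0.2.2]
    (fun z hz => by rw [pvF_key (by rw [hF0]; exact List.mem_cons_of_mem _ hz), hk0])
  rw [hblock]
  have hbs : ks.flatMap (pvF w) = (ks.map (fun k => (k, pvF w k))).flatMap (fun p => p.2) := by
    rw [List.flatMap_map]
  rw [hbs]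
  have hrun := pv_run_fold (ks.map (fun k => (k, pvF w k))) [] [] y0.1
    ([y0.2.1] ++ t0.map (fun y => y.2.1)) ([y0.2.2] ++ t0.map (fun y => y.2.2))
    (by
      intro p hp
      obtain ⟨k, hkks, rfl⟩ := List.mem_map.mp hp
      refine ⟨?_, fun z hz => pvF_key hz⟩
      obtain ⟨z, t, hzt⟩ := pvF_nonempty (hcov k (by simp [hkks]))
      rw [hzt]; simp)
    (by
      rw [hk0]
      have : (ks.map (fun k => (k, pvF w k))).map (fun p => p.1) = ks := by
        simp [Function.comp_def]
      rw [this]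
      exact hpw.imp pvLtk_ne)
  rw [pv_range_zip _ _ (by rw [hrun.1, hrun.2]; simp), hrun.1, hrun.2]
  have hm1 : ([] : List (List (Int × Int))) ++ [[y0.2.1] ++ t0.map (fun y => y.2.1)] ++
      (ks.map (fun k => (k, pvF w k))).map (fun p => p.2.map (fun y => y.2.1)) =
      (k0 :: ks).map (fun k => (pvF w k).map (fun y => y.2.1)) := by
    simp [hF0]
  have hm2 : ([] : List (List Int)) ++ [[y0.2.2] ++ t0.map (fun y => y.2.2)] ++
      (ks.map (fun k => (k, pvF w k))).map (fun p => p.2.map (fun y => y.2.2)) =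
      (k0 :: ks).map (fun k => (pvF w k).map (fun y => y.2.2)) := by
    simp [hF0]
  rw [hm1, hm2, List.zip_map']

theorem compute_mtp_cis_pairs_raises : Claim_raises_compute_mtp_cis_pairs := by
  unfold Claim_raises_compute_mtp_cis_pairs
  exact ⟨by intro v _ h hp; exact hp h, by decide⟩

-- witness self-check: the crash-fix theorem really records B's value at the stored witness
theorem compute_mtp_cis_pairs_raises_witness_ok :
    compute_mtp_cis_pairs_alt pvRaiseWitness_compute_mtp_cis_pairs =
      pvRaiseWitnessOut_compute_mtp_cis_pairs := by
  have h := compute_mtp_cis_pairs_raises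
  unfold Claim_raises_compute_mtp_cis_pairs at h
  exact h.2.2.2
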